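-- pv_equiv track=rewrite | github.com/ssanderson/dask | dask/order.py | child_max
-- ===== SOURCE A (Python) =====
-- def child_max(dependencies, dependents, scores):
--     """ Maximum-ish of scores of children
--
--     This takes a dictionary of scores per key and returns a new set of scores
--     per key that is the maximum of the scores of all children of that node plus
--     its own score.  In some sense this ranks each node by the maximum
--     importance of their children plus their own value.
--
--     This is generally fed the result from ``ndependents``
--
--     Examples
--     --------
--
--     >>> dsk = {'a': 1, 'b': 2, 'c': (inc, 'a'), 'd': (add, 'b', 'c')}
--     >>> scores = {'a': 3, 'b': 2, 'c': 2, 'd': 1}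
--     >>> dependencies, dependents = get_deps(dsk)
--
--     >>> sorted(child_max(dependencies, dependents, scores).items())
--     [('a', 3), ('b', 2), ('c', 5), ('d', 6)]
--     """
--     result = dict()
--
--     leaves = [k for k, v in dependencies.items() if not v]
--
--     for leaf in leaves:
--         result[leaf] = scores[leaf]
--
--     roots = [k for k, v in dependents.items() if not v]
--
--     for root in roots:
--         _child_max(root, scores, result, dependencies, dependents)
--
--     return result
--
-- def _child_max(key, scores, result, dependencies, dependents):
--     """ Recursive helper function for child_max """
--     if key not in result:
--         deps = dependencies[key]
--         result[key] = max([_child_max(k, scores, result, dependencies,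
--                                       dependents) for k in deps]) + scores[key]
--     return result[key]
-- ===== SOURCE B (Python) =====
-- def child_max(dependencies, dependents, scores):
--     # Iterative explicit-stack DFS instead of A's memoized recursion (no
--     # recursion depth limit); same result dict.
--     result = {k: scores[k] for k, v in dependencies.items() if not v}
--     for root, v in dependents.items():
--         if v:
--             continue
--         stack = [(root, True)]
--         while stack:
--             key, enter = stack.pop()
--             if enter:
--                 if key not in result:
--                     stack.append((key, False))
--                     for d in reversed(list(dependencies[key])):
--                         stack.append((d, True))
--             else:
--                 result[key] = max(result[d] for d in dependencies[key]) + scores[key]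
--     return result
-- ===== Notes on version B (the rewrite author's own statement) =====
-- stated objective: alternative
-- what changed: Replaces A's top-down memoized recursion (helper _child_max) by an iterative explicit-stack post-order DFS from each root, so no Python recursion and no call stack; same result dict in the same insertion order.
import Mathlib
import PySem

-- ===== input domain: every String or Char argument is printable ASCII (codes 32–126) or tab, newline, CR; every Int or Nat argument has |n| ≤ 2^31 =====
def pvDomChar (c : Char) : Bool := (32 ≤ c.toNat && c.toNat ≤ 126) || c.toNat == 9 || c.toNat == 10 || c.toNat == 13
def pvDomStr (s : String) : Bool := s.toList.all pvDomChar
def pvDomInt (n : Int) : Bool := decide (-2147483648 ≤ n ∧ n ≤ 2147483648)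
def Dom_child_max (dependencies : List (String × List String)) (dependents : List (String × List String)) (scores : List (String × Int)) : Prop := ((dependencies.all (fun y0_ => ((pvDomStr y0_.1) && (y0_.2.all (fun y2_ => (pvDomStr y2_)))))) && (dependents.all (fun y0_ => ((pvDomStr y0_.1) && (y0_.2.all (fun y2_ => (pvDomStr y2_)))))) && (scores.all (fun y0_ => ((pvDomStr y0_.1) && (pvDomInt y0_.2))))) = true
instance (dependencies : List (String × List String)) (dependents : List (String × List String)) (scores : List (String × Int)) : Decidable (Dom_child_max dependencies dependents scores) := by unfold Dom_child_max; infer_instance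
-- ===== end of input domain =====

-- B replaces A's memoized recursion by an iterative explicit-stack post-order DFS
-- from each root (no recursion); the return dict is the same, in the same insertion order.

-- ===== PORT A =====
-- seeding loop: result[leaf] = scores[leaf] for every leaf (KeyError → none)
def cmSeed (deps : PySem.Dict String (List String)) (scs : PySem.Dict String Int) :
    Option (PySem.Dict String Int) :=
  ((deps.items.filter (fun kv => kv.2.isEmpty)).map (·.1)).foldl
    (fun acc leaf => acc.bind fun r => (scs.get? leaf).map fun v => r.insert leaf v)
    (some PySem.Dict.empty)

-- _child_max: memoized recursion; fuel bounds the recursion depth (Python would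
-- hit RecursionError / not return on a cycle; those inputs lie outside Pre_).
mutual
def cmAux (scs : PySem.Dict String Int) (deps : PySem.Dict String (List String)) :
    Nat → String → PySem.Dict String Int → Option (Int × PySem.Dict String Int)
  | 0, _, _ => none
  | f+1, key, result =>
    match result.get? key with
    | some v => some (v, result)                    -- if key in result
    | none =>
      match deps.get? key with
      | none => none                                -- KeyError dependencies[key]
      | some ds =>
        match cmList scs deps f ds result with      -- [_child_max(k, …) for k in deps]
        | none => none
        | some (vs, r') =>
          match PySem.List.max? vs (fun x => x), scs.get? key with
          | some m, some s => some (m + s, r'.insert key (m + s))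
          | _, _ => none                            -- max([]) / KeyError scores[key]
termination_by f _ _ => (f, 0)

def cmList (scs : PySem.Dict String Int) (deps : PySem.Dict String (List String)) :
    Nat → List String → PySem.Dict String Int → Option (List Int × PySem.Dict String Int)
  | _, [], r => some ([], r)
  | f, d :: ds, r =>
    match cmAux scs deps f d r with
    | none => none
    | some (v, r') =>
      match cmList scs deps f ds r' with
      | none => none
      | some (vs, r'') => some (v :: vs, r'')
termination_by f ds _ => (f, ds.length + 1)
end

def child_max (dependencies : List (String × List String)) (dependents : List (String × List String)) (scores : List (String × Int)) : List (String × Int) :=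
  let deps := PySem.Dict.ofList dependencies
  let dts := PySem.Dict.ofList dependents
  let scs := PySem.Dict.ofList scores
  let roots := (dts.items.filter (fun kv => kv.2.isEmpty)).map (·.1)
  let res := roots.foldl
    (fun acc root => acc.bind fun r => (cmAux scs deps (deps.size + 1) root r).map (·.2))
    (cmSeed deps scs)
  (res.getD PySem.Dict.empty).items   -- unreachable default: Pre_ excludes the raising inputs

-- ===== PORT B =====
-- dict comprehension {k: scores[k] for k, v in dependencies.items() if not v}
def cmSeedB (deps : PySem.Dict String (List String)) (scs : PySem.Dict String Int) :
    Option (PySem.Dict String Int) :=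
  deps.items.foldl
    (fun acc kv => if kv.2.isEmpty then (acc.bind fun r => (scs.get? kv.1).map fun v => r.insert kv.1 v) else acc)
    (some PySem.Dict.empty)

-- the while-loop over the explicit stack; a frame (k, true) is "enter k",
-- (k, false) is "compute k from its (already computed) deps".  Source B pushes the
-- reversed deps onto a tail stack; popping them is this head-first list.
def cmStep (scs : PySem.Dict String Int) (deps : PySem.Dict String (List String)) :
    Nat → List (String × Bool) → PySem.Dict String Int → Option (PySem.Dict String Int)
  | 0, _, _ => none                                 -- fuel: the while loop does not
                                                    -- terminate on a cycle (outside Pre_)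
  | _+1, [], r => some r
  | f+1, (key, true) :: stk, r =>
    if r.contains key then cmStep scs deps f stk r
    else
      match deps.get? key with
      | none => none                                -- KeyError dependencies[key]
      | some ds => cmStep scs deps f (ds.map (fun d => (d, true)) ++ (key, false) :: stk) r
  | f+1, (key, false) :: stk, r =>
    match deps.get? key with
    | none => none
    | some ds =>
      match ds.mapM r.get?, scs.get? key with       -- result[d] for d in deps; scores[key]
      | some vs, some s =>
        match PySem.List.max? vs (fun x => x) with
        | some m => cmStep scs deps f stk (r.insert key (m + s))
        | none => none                              -- max of empty sequence
      | _, _ => none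

-- steps the stack machine needs to clear one "enter" frame, given recursion fuel f
-- and maximal out-degree D (any sufficient fuel bound works; only its size matters)
def cmSteps (D : Nat) : Nat → Nat
  | 0 => 1
  | f+1 => D * cmSteps D f + 3

def child_max_alt (dependencies : List (String × List String)) (dependents : List (String × List String)) (scores : List (String × Int)) : List (String × Int) :=
  let deps := PySem.Dict.ofList dependencies
  let dts := PySem.Dict.ofList dependents
  let scs := PySem.Dict.ofList scores
  let D := (deps.items.map (fun kv => kv.2.length)).sum
  let fuel := cmSteps D (deps.size + 1) + 1
  let res := dts.items.foldl
    (fun acc kv => if kv.2.isEmpty then (acc.bind fun r => cmStep scs deps fuel [(kv.1, true)] r) else acc)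
    (cmSeedB deps scs)
  (res.getD PySem.Dict.empty).items

-- ===== PRECONDITION & SPEC =====
-- okChain f k = true ⟺ starting from k, every dependency chain has length < f, every
-- key on it is present in dependencies, and every key that has to be computed (non-empty
-- dependency list) is present in scores: a shape/membership condition on the input
-- graph (it never computes scores, maxima or result dicts).
def okChain (deps : PySem.Dict String (List String)) (scs : PySem.Dict String Int) :
    Nat → String → Bool
  | 0, _ => false
  | f+1, k =>
    match deps.get? k with
    | none => false
    | some ds => ds.isEmpty || (scs.contains k && ds.all (okChain deps scs f))

-- Pre_: exactly the inputs on which A returns normally: every leaf (key of dependencies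
-- with empty value) has a score, and from every root (key of dependents with empty value)
-- the dependency graph is fully defined, scored and acyclic (otherwise A raises
-- KeyError / RecursionError or recurses forever).
def Pre_child_max (dependencies : List (String × List String)) (dependents : List (String × List String)) (scores : List (String × Int)) : Prop :=
  (∀ kv ∈ (PySem.Dict.ofList dependencies).items, kv.2 = [] →
      (PySem.Dict.ofList scores).contains kv.1 = true) ∧
  (∀ kv ∈ (PySem.Dict.ofList dependents).items, kv.2 = [] →
      okChain (PySem.Dict.ofList dependencies) (PySem.Dict.ofList scores)
        ((PySem.Dict.ofList dependencies).size + 1) kv.1 = true)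
instance (dependencies : List (String × List String)) (dependents : List (String × List String)) (scores : List (String × Int)) : Decidable (Pre_child_max dependencies dependents scores) := by unfold Pre_child_max; infer_instance

def pvWitness_child_max : (List (String × List String)) × (List (String × List String)) × (List (String × Int)) :=
  ([("a", []), ("b", []), ("c", ["a"]), ("d", ["b", "c"])],
   [("a", ["c"]), ("b", ["d"]), ("c", ["d"]), ("d", [])],
   [("a", 3), ("b", 2), ("c", 2), ("d", 1)])

def Spec_child_max (dependencies : List (String × List String)) (dependents : List (String × List String)) (scores : List (String × Int)) (out : List (String × Int)) : Prop := out = child_max_alt dependencies dependents scores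
instance (dependencies : List (String × List String)) (dependents : List (String × List String)) (scores : List (String × Int)) (out : List (String × Int)) : Decidable (Spec_child_max dependencies dependents scores out) := by unfold Spec_child_max; infer_instance

-- ===== CLAIM (what is proved, stated in full; the proofs are below) =====
def Claim_equal_child_max : Prop := ∀ (dependencies : List (String × List String)) (dependents : List (String × List String)) (scores : List (String × Int)), Dom_child_max dependencies dependents scores → Pre_child_max dependencies dependents scores → Spec_child_max dependencies dependents scores (child_max dependencies dependents scores)

-- ===== LEMMAS AND PROOFS =====

theorem cmAux_get (scs : PySem.Dict String Int) (deps : PySem.Dict String (List String))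
    (f : Nat) (key : String) (r : PySem.Dict String Int) (v : Int) (r' : PySem.Dict String Int)
    (h : cmAux scs deps f key r = some (v, r')) : r'.get? key = some v := by
  cases f with
  | zero => simp [cmAux] at h
  | succ f =>
    rw [cmAux] at h
    split at h
    · simp_all
    · split at h
      · simp at h
      · split at h
        · simp at h
        · split at h
          · rename_i m s _
            simp only [Option.some.injEq, Prod.mk.injEq] at h
            obtain ⟨hv, hr⟩ := h
            subst hv hr
            exact PySem.Dict.get?_insert_self _ _ _
          · simp at h
def DMono (r r' : PySem.Dict String Int) : Prop :=
  ∀ x w, r.get? x = some w → r'.get? x = some w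

theorem cmList_mono_of (scs : PySem.Dict String Int) (deps : PySem.Dict String (List String))
    (f : Nat)
    (hA : ∀ key r v r', cmAux scs deps f key r = some (v, r') → DMono r r')
    (ds : List String) (r : PySem.Dict String Int) (vs : List Int) (r' : PySem.Dict String Int)
    (h : cmList scs deps f ds r = some (vs, r')) : DMono r r' := by
  induction ds generalizing r vs with
  | nil => rw [cmList] at h; simp at h; obtain ⟨_, h2⟩ := h; subst h2; intro x w hw; exact hw
  | cons d ds ih =>
    rw [cmList] at h
    split at h
    · simp at h
    · rename_i v1 r1 h1
      split at h
      · simp at h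
      · rename_i vs2 r2 h2
        simp only [Option.some.injEq, Prod.mk.injEq] at h
        obtain ⟨_, hr⟩ := h; subst hr
        intro x w hw
        exact ih r1 vs2 h2 x w (hA d r v1 r1 h1 x w hw)

theorem cmAux_mono (scs : PySem.Dict String Int) (deps : PySem.Dict String (List String)) :
    ∀ (f : Nat) (key : String) (r : PySem.Dict String Int) (v : Int) (r' : PySem.Dict String Int),
      cmAux scs deps f key r = some (v, r') → DMono r r' := by
  intro f
  induction f with
  | zero => intro key r v r' h; simp [cmAux] at h
  | succ f ih =>
    intro key r v r' h
    rw [cmAux] at h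
    split at h
    · rename_i v0 _
      simp only [Option.some.injEq, Prod.mk.injEq] at h
      obtain ⟨_, hr⟩ := h; subst hr; intro x w hw; exact hw
    · rename_i hnone
      split at h
      · simp at h
      · rename_i ds hds
        split at h
        · simp at h
        · rename_i vs r1 hlist
          split at h
          · rename_i m s hmax hs
            simp only [Option.some.injEq, Prod.mk.injEq] at h
            obtain ⟨_, hr⟩ := h; subst hr
            intro x w hw
            have hx : r1.get? x = some w := cmList_mono_of scs deps f ih ds r vs r1 hlist x w hw
            have hxk : x ≠ key := by
              intro hxe; subst hxe
              rw [hw] at hnone; cases hnone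
            rw [PySem.Dict.get?_insert_of_ne _ _ hxk]
            exact hx
          · simp at h

theorem cmList_mono (scs : PySem.Dict String Int) (deps : PySem.Dict String (List String))
    (f : Nat) (ds : List String) (r : PySem.Dict String Int) (vs : List Int) (r' : PySem.Dict String Int)
    (h : cmList scs deps f ds r = some (vs, r')) : DMono r r' :=
  cmList_mono_of scs deps f (cmAux_mono scs deps f) ds r vs r' h
theorem cmSteps_pos (D f : Nat) : 1 ≤ cmSteps D f := by
  cases f with
  | zero => simp [cmSteps]
  | succ f => simp [cmSteps]

def SimAuxP (scs : PySem.Dict String Int) (deps : PySem.Dict String (List String)) (D f : Nat) : Prop :=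
  ∀ (key : String) (r : PySem.Dict String Int) (v : Int) (r' : PySem.Dict String Int),
    cmAux scs deps f key r = some (v, r') →
    ∃ n, n + 1 ≤ cmSteps D f ∧
      ∀ (g : Nat) (stk : List (String × Bool)),
        cmStep scs deps (n + g) ((key, true) :: stk) r = cmStep scs deps g stk r'

theorem simList (scs : PySem.Dict String Int) (deps : PySem.Dict String (List String)) (D f : Nat)
    (hA : SimAuxP scs deps D f) :
    ∀ (ds : List String) (r : PySem.Dict String Int) (vs : List Int) (r' : PySem.Dict String Int),
      cmList scs deps f ds r = some (vs, r') →
      ds.mapM r'.get? = some vs ∧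
      ∃ n, n ≤ ds.length * cmSteps D f ∧
        ∀ (g : Nat) (stk : List (String × Bool)),
          cmStep scs deps (n + g) (ds.map (fun d => (d, true)) ++ stk) r = cmStep scs deps g stk r' := by
  intro ds
  induction ds with
  | nil =>
    intro r vs r' h
    rw [cmList] at h
    simp only [Option.some.injEq, Prod.mk.injEq] at h
    obtain ⟨hvs, hr⟩ := h; subst hvs; subst hr
    refine ⟨by simp, 0, Nat.zero_le _, ?_⟩
    intro g stk
    simp only [Nat.zero_add, List.map_nil, List.nil_append]
  | cons d ds ih =>
    intro r vs r' h
    rw [cmList] at h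
    split at h
    · simp at h
    · rename_i v1 r1 h1
      split at h
      · simp at h
      · rename_i vs2 r2 h2
        simp only [Option.some.injEq, Prod.mk.injEq] at h
        obtain ⟨hvs, hr⟩ := h
        obtain ⟨hmap, n2, hn2, hrun2⟩ := ih r1 vs2 r2 h2
        obtain ⟨n1, hn1, hrun1⟩ := hA d r v1 r1 h1
        have hget : r2.get? d = some v1 :=
          cmList_mono scs deps f ds r1 vs2 r2 h2 d v1 (cmAux_get scs deps f d r v1 r1 h1)
        subst hvs; subst hr
        constructor
        · simp [List.mapM_cons, hget, hmap]
        · refine ⟨n1 + n2, ?_, ?_⟩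
          · have hmul : (ds.length + 1) * cmSteps D f = ds.length * cmSteps D f + cmSteps D f := by
              ring
            simp only [List.length_cons]
            omega
          · intro g stk
            have e : n1 + n2 + g = n1 + (n2 + g) := by omega
            rw [e]
            simp only [List.map_cons, List.cons_append]
            rw [hrun1 (n2 + g) (ds.map (fun d => (d, true)) ++ stk)]
            exact hrun2 g stk

theorem simAux (scs : PySem.Dict String Int) (deps : PySem.Dict String (List String)) (D : Nat)
    (hD : ∀ k ds, deps.get? k = some ds → ds.length ≤ D) :
    ∀ f, SimAuxP scs deps D f := by
  intro f
  induction f with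
  | zero => intro key r v r' h; simp [cmAux] at h
  | succ f ih =>
    intro key r v r' h
    rw [cmAux] at h
    split at h
    · rename_i v0 hv0
      simp only [Option.some.injEq, Prod.mk.injEq] at h
      obtain ⟨hv, hr⟩ := h
      refine ⟨1, ?_, ?_⟩
      · have := cmSteps_pos D f
        simp only [cmSteps]
        omega
      · intro g stk
        have e : 1 + g = g + 1 := by omega
        rw [e, cmStep]
        have hc : r.contains key = true := by
          rw [PySem.Dict.contains_eq_isSome_get?, hv0]; rfl
        simp [hc, ← hr]
    · rename_i hnone
      split at h
      · simp at h
      · rename_i ds hds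
        split at h
        · simp at h
        · rename_i vs r1 hlist
          split at h
          · rename_i m s hmax hs
            simp only [Option.some.injEq, Prod.mk.injEq] at h
            obtain ⟨hv, hr⟩ := h; subst hv; subst hr
            obtain ⟨hmap, n2, hn2, hrun2⟩ := simList scs deps D f ih ds r vs r1 hlist
            refine ⟨n2 + 2, ?_, ?_⟩
            · have hlen : ds.length ≤ D := hD key ds hds
              have : ds.length * cmSteps D f ≤ D * cmSteps D f :=
                Nat.mul_le_mul_right _ hlen
              simp only [cmSteps]
              omega
            · intro g stk
              have e : n2 + 2 + g = (n2 + (1 + g)) + 1 := by omega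
              rw [e, cmStep]
              have hc : r.contains key = false := by
                rw [PySem.Dict.contains_eq_isSome_get?, hnone]; rfl
              simp only [hc, Bool.false_eq_true, if_false, hds]
              rw [hrun2 (1 + g) ((key, false) :: stk)]
              have e2 : 1 + g = g + 1 := by omega
              rw [e2, cmStep, hds]
              simp [hmap, hs, hmax]
          · simp at h
def GoodLeaf (deps : PySem.Dict String (List String)) (r : PySem.Dict String Int) : Prop :=
  ∀ k, deps.get? k = some [] → (r.get? k).isSome

theorem goodLeaf_insert (deps : PySem.Dict String (List String)) (r : PySem.Dict String Int)
    (k : String) (v : Int) (h : GoodLeaf deps r) : GoodLeaf deps (r.insert k v) := by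
  intro x hx
  by_cases hxk : x = k
  · subst hxk; rw [PySem.Dict.get?_insert_self]; rfl
  · rw [PySem.Dict.get?_insert_of_ne _ _ hxk]; exact h x hx

theorem succAux (scs : PySem.Dict String Int) (deps : PySem.Dict String (List String)) :
    ∀ (f : Nat) (key : String) (r : PySem.Dict String Int),
      okChain deps scs f key = true → GoodLeaf deps r →
      ∃ v r', cmAux scs deps f key r = some (v, r') ∧ GoodLeaf deps r' := by
  intro f
  induction f with
  | zero => intro key r hac; simp [okChain] at hac
  | succ f ih =>
    intro key r hac hgl
    rw [okChain] at hac
    cases hds : deps.get? key with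
    | none => rw [hds] at hac; simp at hac
    | some ds =>
      rw [hds] at hac
      cases hv0 : r.get? key with
      | some v0 =>
        refine ⟨v0, r, ?_, hgl⟩
        rw [cmAux, hv0]
      | none =>
        -- the dependency list cannot be empty: GoodLeaf would give a value
        have hdsne : ds ≠ [] := by
          intro hnil; subst hnil
          have := hgl key hds
          rw [hv0] at this; simp at this
        have hac2 : scs.contains key = true ∧ ∀ d ∈ ds, okChain deps scs f d = true := by
          rcases ds with _ | ⟨d, ds'⟩
          · exact absurd rfl hdsne
          · simpa using hac
        obtain ⟨hsck, hall⟩ := hac2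
        have hlist : ∀ (l : List String), (∀ d ∈ l, okChain deps scs f d = true) →
            ∀ r0, GoodLeaf deps r0 →
            ∃ vs r1, cmList scs deps f l r0 = some (vs, r1) ∧ vs.length = l.length ∧
              GoodLeaf deps r1 := by
          intro l
          induction l with
          | nil => intro _ r0 hg; exact ⟨[], r0, by rw [cmList], rfl, hg⟩
          | cons d l ihl =>
            intro hall' r0 hg
            obtain ⟨v1, r1, h1, hg1⟩ := ih d r0 (hall' d (by simp)) hg
            obtain ⟨vs, r2, h2, hlen, hg2⟩ := ihl (fun x hx => hall' x (by simp [hx])) r1 hg1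
            exact ⟨v1 :: vs, r2, by simp [cmList, h1, h2], by simp [hlen], hg2⟩
        obtain ⟨vs, r1, hl, hlen, hg1⟩ := hlist ds hall r hgl
        have hvsne : vs ≠ [] := by
          intro hnil; subst hnil
          simp at hlen
          exact hdsne (List.eq_nil_of_length_eq_zero hlen.symm)
        have hmax : ∃ m, PySem.List.max? vs (fun x => x) = some m := by
          cases hm : PySem.List.max? vs (fun x => x) with
          | some m => exact ⟨m, rfl⟩
          | none => exact absurd ((PySem.List.max?_eq_none_iff vs (fun x => x)).mp hm) hvsne
        obtain ⟨m, hm⟩ := hmax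
        have hsc : ∃ s, scs.get? key = some s := by
          rw [PySem.Dict.contains_eq_isSome_get?] at hsck
          cases hsk : scs.get? key with
          | some s => exact ⟨s, rfl⟩
          | none => rw [hsk] at hsck; simp at hsck
        obtain ⟨s, hs⟩ := hsc
        refine ⟨m + s, r1.insert key (m + s), ?_, goodLeaf_insert _ _ _ _ hg1⟩
        simp [cmAux, hv0, hds, hl, hm, hs]

theorem seed_eq (deps : PySem.Dict String (List String)) (scs : PySem.Dict String Int) :
    cmSeed deps scs = cmSeedB deps scs := by
  unfold cmSeed cmSeedB
  rw [List.foldl_map, List.foldl_filter]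

theorem seedFold (scs : PySem.Dict String Int) :
    ∀ (l : List (String × List String)) (r : PySem.Dict String Int),
      (∀ kv ∈ l, kv.2.isEmpty = true → (scs.get? kv.1).isSome = true) →
      ∃ r', l.foldl (fun acc kv => if kv.2.isEmpty then (acc.bind fun r => (scs.get? kv.1).map fun v => r.insert kv.1 v) else acc) (some r) = some r' ∧
        (∀ x, (r.get? x).isSome = true → (r'.get? x).isSome = true) ∧
        (∀ kv ∈ l, kv.2.isEmpty = true → (r'.get? kv.1).isSome = true) := by
  intro l
  induction l with
  | nil => intro r _; exact ⟨r, rfl, fun x h => h, by simp⟩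
  | cons kv l ih =>
    intro r hall
    by_cases hkv : kv.2.isEmpty = true
    · have hsome := hall kv (by simp) hkv
      cases hv : scs.get? kv.1 with
      | none => rw [hv] at hsome; simp at hsome
      | some v =>
        obtain ⟨r', hfold, hmono, hl⟩ := ih (r.insert kv.1 v) (fun x hx h => hall x (by simp [hx]) h)
        have hkv2 : kv.2 = [] := List.isEmpty_iff.mp hkv
        refine ⟨r', ?_, ?_, ?_⟩
        · simpa [hkv2, hv] using hfold
        · intro x hx
          apply hmono
          by_cases hxk : x = kv.1
          · subst hxk; rw [PySem.Dict.get?_insert_self]; rfl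
          · rw [PySem.Dict.get?_insert_of_ne _ _ hxk]; exact hx
        · intro kv' hkv' he
          rcases List.mem_cons.mp hkv' with h1 | h2
          · subst h1
            apply hmono
            rw [PySem.Dict.get?_insert_self]; rfl
          · exact hl kv' h2 he
    · obtain ⟨r', hfold, hmono, hl⟩ := ih r (fun x hx h => hall x (by simp [hx]) h)
      have hkv2 : kv.2 ≠ [] := by simpa using hkv
      refine ⟨r', by simpa [hkv2] using hfold, hmono, ?_⟩
      intro kv' hkv' he
      rcases List.mem_cons.mp hkv' with h1 | h2
      · subst h1; exact absurd he hkv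
      · exact hl kv' h2 he

theorem seed_some (deps : PySem.Dict String (List String)) (scs : PySem.Dict String Int)
    (hleafsc : ∀ kv ∈ deps.items, kv.2 = [] → scs.contains kv.1 = true) :
    ∃ r0, cmSeedB deps scs = some r0 ∧ GoodLeaf deps r0 := by
  have hall : ∀ kv ∈ deps.items, kv.2.isEmpty = true → (scs.get? kv.1).isSome = true := by
    intro kv hkv he
    have := hleafsc kv hkv (List.isEmpty_iff.mp he)
    rw [PySem.Dict.contains_eq_isSome_get?] at this
    exact this
  obtain ⟨r0, hfold, _, hleaf⟩ := seedFold scs deps.items PySem.Dict.empty hall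
  refine ⟨r0, hfold, ?_⟩
  intro k hk
  exact hleaf (k, []) (PySem.Dict.mem_items_of_get?_eq_some _ hk) rfl

theorem rootsFold (scs : PySem.Dict String Int) (deps : PySem.Dict String (List String))
    (D N : Nat)
    (hD : ∀ k ds, deps.get? k = some ds → ds.length ≤ D) :
    ∀ (l : List (String × List String)) (r : PySem.Dict String Int),
      GoodLeaf deps r →
      (∀ kv ∈ l, kv.2 = [] → okChain deps scs N kv.1 = true) →
      ∃ rf,
        l.foldl (fun acc kv => if kv.2.isEmpty then (acc.bind fun r => (cmAux scs deps N kv.1 r).map (·.2)) else acc) (some r) = some rf ∧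
        l.foldl (fun acc kv => if kv.2.isEmpty then (acc.bind fun r => cmStep scs deps (cmSteps D N + 1) [(kv.1, true)] r) else acc) (some r) = some rf := by
  intro l
  induction l with
  | nil => intro r _ _; exact ⟨r, rfl, rfl⟩
  | cons kv l ih =>
    intro r hgl hall
    by_cases hkv : kv.2.isEmpty = true
    · have hkv2 : kv.2 = [] := List.isEmpty_iff.mp hkv
      have hac := hall kv (by simp) hkv2
      obtain ⟨v, r', haux, hgl'⟩ := succAux scs deps N kv.1 r hac hgl
      obtain ⟨n, hn, hrun⟩ := simAux scs deps D hD N kv.1 r v r' haux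
      have hstep : cmStep scs deps (cmSteps D N + 1) [(kv.1, true)] r = some r' := by
        have e : cmSteps D N + 1 = n + (cmSteps D N + 1 - n) := by omega
        rw [e, hrun (cmSteps D N + 1 - n) []]
        have e2 : cmSteps D N + 1 - n = (cmSteps D N - n) + 1 := by omega
        rw [e2, cmStep]
      obtain ⟨rf, hA, hB⟩ := ih r' hgl' (fun x hx h => hall x (by simp [hx]) h)
      refine ⟨rf, ?_, ?_⟩
      · simpa [hkv2, haux] using hA
      · simpa [hkv2, hstep] using hB
    · have hkv2 : kv.2 ≠ [] := by simpa using hkv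
      obtain ⟨rf, hA, hB⟩ := ih r hgl (fun x hx h => hall x (by simp [hx]) h)
      exact ⟨rf, by simpa [hkv2] using hA, by simpa [hkv2] using hB⟩


-- ===== VERDICT (by name: the statement is the Claim_ definition above) =====
theorem child_max_spec : Claim_equal_child_max := by
  intro dependencies dependents scores _hDom hPre
  obtain ⟨hleafsc, hok⟩ := hPre
  unfold Spec_child_max child_max child_max_alt
  simp only []
  set deps := PySem.Dict.ofList dependencies with hdeps
  set dts := PySem.Dict.ofList dependents with hdts
  set scs := PySem.Dict.ofList scores with hscs
  set D := (deps.items.map (fun kv => kv.2.length)).sum with hDdef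
  set N := deps.size + 1 with hN
  have hD : ∀ k ds, deps.get? k = some ds → ds.length ≤ D := by
    intro k ds h
    have hmem : (k, ds) ∈ deps.items := PySem.Dict.mem_items_of_get?_eq_some _ h
    have hmem2 : ds.length ∈ deps.items.map (fun kv => kv.2.length) :=
      List.mem_map.mpr ⟨(k, ds), hmem, rfl⟩
    exact List.single_le_sum (fun x _ => Nat.zero_le x) _ hmem2
  obtain ⟨r0, hseedB, hgl0⟩ := seed_some deps scs hleafsc
  have hseedA : cmSeed deps scs = some r0 := by rw [seed_eq]; exact hseedB
  obtain ⟨rf, hA, hB⟩ := rootsFold scs deps D N hD dts.items r0 hgl0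
    (fun kv hkv h => hok kv hkv h)
  rw [List.foldl_map, List.foldl_filter, hseedA, hseedB, hA, hB]
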